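-- pv_equiv track=rewrite | github.com/salacoste/hive | scripts/upstream_delta_status.py | classify_paths
-- ===== SOURCE A (Python) =====
-- BUCKET_A_LOW_RISK: set[str] = {
--     ".gitignore",
--     "README.md",
--     "core/framework/runtime/README.md",
--     "docs/browser-extension-setup.html",
--     "docs/configuration.md",
--     "docs/developer-guide.md",
--     "docs/environment-setup.md",
-- }
--
-- BUCKET_B_MEDIUM_RISK: set[str] = {
--     "core/framework/agents/queen/nodes/__init__.py",
--     "core/framework/agents/queen/queen_memory_v2.py",
--     "core/framework/agents/queen/recall_selector.py",
--     "core/framework/graph/context.py",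
--     "core/framework/graph/executor.py",
--     "core/framework/graph/worker_agent.py",
--     "core/framework/runtime/agent_runtime.py",
--     "core/framework/runtime/execution_stream.py",
--     "core/framework/tools/queen_lifecycle_tools.py",
--     "core/tests/test_event_bus.py",
--     "core/tests/test_queen_memory.py",
-- }
--
-- BUCKET_C_HIGH_RISK: set[str] = {
--     "core/framework/agents/queen/queen_memory.py",
--     "core/framework/tools/queen_memory_tools.py",
-- }
--
-- def classify_paths(paths: list[str]) -> dict[str, list[str]]:
--     """Classify paths into wave buckets."""
--     bucket_a: list[str] = []
--     bucket_b: list[str] = []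
--     bucket_c: list[str] = []
--     other: list[str] = []
--     for path in sorted(set(paths)):
--         if path in BUCKET_A_LOW_RISK:
--             bucket_a.append(path)
--         elif path in BUCKET_B_MEDIUM_RISK:
--             bucket_b.append(path)
--         elif path in BUCKET_C_HIGH_RISK:
--             bucket_c.append(path)
--         else:
--             other.append(path)
--     return {
--         "bucket_a_low_risk": bucket_a,
--         "bucket_b_medium_risk": bucket_b,
--         "bucket_c_high_risk": bucket_c,
--         "other_unclassified": other,
--     }
-- ===== SOURCE B (Python) =====
-- BUCKET_A_LOW_RISK: set[str] = {
--     ".gitignore",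
--     "README.md",
--     "core/framework/runtime/README.md",
--     "docs/browser-extension-setup.html",
--     "docs/configuration.md",
--     "docs/developer-guide.md",
--     "docs/environment-setup.md",
-- }
--
-- BUCKET_B_MEDIUM_RISK: set[str] = {
--     "core/framework/agents/queen/nodes/__init__.py",
--     "core/framework/agents/queen/queen_memory_v2.py",
--     "core/framework/agents/queen/recall_selector.py",
--     "core/framework/graph/context.py",
--     "core/framework/graph/executor.py",
--     "core/framework/graph/worker_agent.py",
--     "core/framework/runtime/agent_runtime.py",
--     "core/framework/runtime/execution_stream.py",
--     "core/framework/tools/queen_lifecycle_tools.py",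
--     "core/tests/test_event_bus.py",
--     "core/tests/test_queen_memory.py",
-- }
--
-- BUCKET_C_HIGH_RISK: set[str] = {
--     "core/framework/agents/queen/queen_memory.py",
--     "core/framework/tools/queen_memory_tools.py",
-- }
--
--
-- def classify_paths(paths: list[str]) -> dict[str, list[str]]:
--     """Classify paths into wave buckets by set algebra (buckets are pairwise disjoint)."""
--     u = set(paths)
--     return {
--         "bucket_a_low_risk": sorted(u & BUCKET_A_LOW_RISK),
--         "bucket_b_medium_risk": sorted(u & BUCKET_B_MEDIUM_RISK),
--         "bucket_c_high_risk": sorted(u & BUCKET_C_HIGH_RISK),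
--         "other_unclassified": sorted(u - BUCKET_A_LOW_RISK - BUCKET_B_MEDIUM_RISK - BUCKET_C_HIGH_RISK),
--     }
-- ===== Notes on version B (the rewrite author's own statement) =====
-- stated objective: alternative
-- what changed: The single sorted pass with an if/elif branch chain and four growing accumulators is replaced by set algebra: each bucket is produced independently as sorted(u & BUCKET) and the remainder as sorted(u - A - B - C), relying on the buckets' pairwise disjointness to make the elif priority irrelevant.
import Mathlib
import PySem

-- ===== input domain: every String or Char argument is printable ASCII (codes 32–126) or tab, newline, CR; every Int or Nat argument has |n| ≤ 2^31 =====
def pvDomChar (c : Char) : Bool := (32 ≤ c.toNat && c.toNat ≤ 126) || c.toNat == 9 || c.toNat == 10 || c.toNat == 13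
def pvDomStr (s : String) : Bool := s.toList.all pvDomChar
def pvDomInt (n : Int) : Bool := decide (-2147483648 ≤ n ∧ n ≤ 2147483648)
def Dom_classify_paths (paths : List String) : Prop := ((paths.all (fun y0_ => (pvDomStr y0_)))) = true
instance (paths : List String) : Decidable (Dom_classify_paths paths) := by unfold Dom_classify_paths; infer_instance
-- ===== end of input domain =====

-- B replaces A's single sorted if/elif pass by independent set-algebra passes (intersection/difference per bucket); same cost, relies on bucket disjointness.

-- module constants (only membership is used, so list order is irrelevant)
def pvBucketA : PySem.Set String := PySem.Set.ofList
  [".gitignore", "README.md", "core/framework/runtime/README.md",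
   "docs/browser-extension-setup.html", "docs/configuration.md",
   "docs/developer-guide.md", "docs/environment-setup.md"]

def pvBucketB : PySem.Set String := PySem.Set.ofList
  ["core/framework/agents/queen/nodes/__init__.py",
   "core/framework/agents/queen/queen_memory_v2.py",
   "core/framework/agents/queen/recall_selector.py",
   "core/framework/graph/context.py",
   "core/framework/graph/executor.py",
   "core/framework/graph/worker_agent.py",
   "core/framework/runtime/agent_runtime.py",
   "core/framework/runtime/execution_stream.py",
   "core/framework/tools/queen_lifecycle_tools.py",
   "core/tests/test_event_bus.py",
   "core/tests/test_queen_memory.py"]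

def pvBucketC : PySem.Set String := PySem.Set.ofList
  ["core/framework/agents/queen/queen_memory.py",
   "core/framework/tools/queen_memory_tools.py"]

-- ===== PORT A =====
def classify_paths (paths : List String) : List (String × List String) :=
  let r := (PySem.List.sorted (PySem.Set.ofList paths) (fun x => x) false).foldl
    (fun (acc : List String × List String × List String × List String) path =>
      if PySem.Set.contains pvBucketA path then (acc.1 ++ [path], acc.2.1, acc.2.2.1, acc.2.2.2)
      else if PySem.Set.contains pvBucketB path then (acc.1, acc.2.1 ++ [path], acc.2.2.1, acc.2.2.2)
      else if PySem.Set.contains pvBucketC path then (acc.1, acc.2.1, acc.2.2.1 ++ [path], acc.2.2.2)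
      else (acc.1, acc.2.1, acc.2.2.1, acc.2.2.2 ++ [path]))
    ([], [], [], [])
  [("bucket_a_low_risk", r.1), ("bucket_b_medium_risk", r.2.1),
   ("bucket_c_high_risk", r.2.2.1), ("other_unclassified", r.2.2.2)]

-- ===== PORT B =====
def classify_paths_alt (paths : List String) : List (String × List String) :=
  let u : PySem.Set String := PySem.Set.ofList paths
  [("bucket_a_low_risk", PySem.List.sorted (PySem.Set.inter u pvBucketA) (fun x => x) false),
   ("bucket_b_medium_risk", PySem.List.sorted (PySem.Set.inter u pvBucketB) (fun x => x) false),
   ("bucket_c_high_risk", PySem.List.sorted (PySem.Set.inter u pvBucketC) (fun x => x) false),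
   ("other_unclassified", PySem.List.sorted
      (PySem.Set.diff (PySem.Set.diff (PySem.Set.diff u pvBucketA) pvBucketB) pvBucketC)
      (fun x => x) false)]

-- ===== PRECONDITION & SPEC =====
def Spec_classify_paths (paths : List String) (out : List (String × List String)) : Prop := out = classify_paths_alt paths
instance (paths : List String) (out : List (String × List String)) : Decidable (Spec_classify_paths paths out) := by unfold Spec_classify_paths; infer_instance

-- ===== CLAIM (what is proved, stated in full; the proofs are below) =====
def Claim_equal_classify_paths : Prop := ∀ (paths : List String), Dom_classify_paths paths → Spec_classify_paths paths (classify_paths paths)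

-- ===== LEMMAS AND PROOFS =====

-- the bucket sets are pairwise disjoint (specific to these constants)
lemma pv_disj_BA : ∀ x ∈ pvBucketB, x ∉ pvBucketA := by decide
lemma pv_disj_CA : ∀ x ∈ pvBucketC, x ∉ pvBucketA := by decide
lemma pv_disj_CB : ∀ x ∈ pvBucketC, x ∉ pvBucketB := by decide

-- A's fold with four append-accumulators is four filters by the elif-chain predicates
lemma pv_fold_filter (u : List String) (a b c d : List String) :
    u.foldl
      (fun (acc : List String × List String × List String × List String) path =>
        if path ∈ pvBucketA then (acc.1 ++ [path], acc.2)
        else if path ∈ pvBucketB then (acc.1, acc.2.1 ++ [path], acc.2.2)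
        else if path ∈ pvBucketC then (acc.1, acc.2.1, acc.2.2.1 ++ [path], acc.2.2.2)
        else (acc.1, acc.2.1, acc.2.2.1, acc.2.2.2 ++ [path]))
      (a, b, c, d)
    = (a ++ u.filter (fun x => decide (x ∈ pvBucketA)),
       b ++ u.filter (fun x => !decide (x ∈ pvBucketA) && decide (x ∈ pvBucketB)),
       c ++ u.filter (fun x => !decide (x ∈ pvBucketA) && !decide (x ∈ pvBucketB) && decide (x ∈ pvBucketC)),
       d ++ u.filter (fun x => !decide (x ∈ pvBucketA) && !decide (x ∈ pvBucketB) && !decide (x ∈ pvBucketC))) := by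
  induction u generalizing a b c d with
  | nil => simp
  | cons x t ih =>
    by_cases hA : x ∈ pvBucketA
    · simp [hA, ih]
    · by_cases hB : x ∈ pvBucketB
      · simp [hA, hB, ih]
      · by_cases hC : x ∈ pvBucketC
        · simp [hA, hB, hC, ih]
        · simp [hA, hB, hC, ih]

-- filtering the sorted dedup list equals sorting the corresponding filter of the raw dedup
lemma pv_sorted_filter (paths : List String) (p : String → Bool) :
    PySem.List.sorted ((PySem.Set.ofList paths).filter p) (fun x => x) false
    = (PySem.List.sorted (PySem.Set.ofList paths) (fun x => x) false).filter p := by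
  apply PySem.List.sorted_eq_of_perm_of_pairwise_lt
  · exact ((PySem.List.sorted_perm (PySem.Set.ofList paths) (fun x => x) false).filter p)
  · exact (PySem.List.sorted_ofList_pairwise_lt paths).filter p

theorem classify_paths_spec_aux (paths : List String) :
    classify_paths paths = classify_paths_alt paths := by
  unfold classify_paths classify_paths_alt
  have hdef : ∀ s t : PySem.Set String, PySem.Set.inter s t = s.filter (fun x => PySem.Set.contains t x) := fun _ _ => rfl
  have hdiff : ∀ s t : PySem.Set String, PySem.Set.diff s t = s.filter (fun x => !PySem.Set.contains t x) := fun _ _ => rfl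
  simp only [hdef, hdiff, List.filter_filter, pv_sorted_filter]
  simp [pv_fold_filter]
  set s := PySem.List.sorted (PySem.Set.ofList paths) (fun x => x) false with hs
  refine ⟨?_, ?_, ?_⟩
  · apply List.filter_congr
    intro x _
    by_cases hB : x ∈ pvBucketB
    · simp [hB, pv_disj_BA x hB]
    · simp [hB]
  · apply List.filter_congr
    intro x _
    by_cases hC : x ∈ pvBucketC
    · simp [hC, pv_disj_CA x hC, pv_disj_CB x hC]
    · simp [hC]
  · apply List.filter_congr
    intro x _
    by_cases hA : x ∈ pvBucketA <;> by_cases hB : x ∈ pvBucketB <;> simp [hA, hB, Bool.and_comm]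

-- ===== VERDICT (by name: the statement is the Claim_ definition above) =====
theorem classify_paths_spec : Claim_equal_classify_paths := by
  intro paths _
  exact classify_paths_spec_aux paths
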